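-- pv_equiv track=rewrite | github.com/ttan0091/RA3 | 4.6/char_obfuscate.py | apply_homoglyph_to_word
-- ===== SOURCE A (Python) =====
-- HOMOGLYPHS = {
--     # 西里尔字母替换拉丁字母
--     'a': 'а',  # U+0430 CYRILLIC SMALL LETTER A
--     'c': 'с',  # U+0441 CYRILLIC SMALL LETTER ES
--     'e': 'е',  # U+0435 CYRILLIC SMALL LETTER IE
--     'o': 'о',  # U+043E CYRILLIC SMALL LETTER O
--     'p': 'р',  # U+0440 CYRILLIC SMALL LETTER ER
--     'x': 'х',  # U+0445 CYRILLIC SMALL LETTER HA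
--     'y': 'у',  # U+0443 CYRILLIC SMALL LETTER U
--     'A': 'А',  # U+0410 CYRILLIC CAPITAL LETTER A
--     'B': 'В',  # U+0412 CYRILLIC CAPITAL LETTER VE
--     'C': 'С',  # U+0421 CYRILLIC CAPITAL LETTER ES
--     'E': 'Е',  # U+0415 CYRILLIC CAPITAL LETTER IE
--     'H': 'Н',  # U+041D CYRILLIC CAPITAL LETTER EN
--     'K': 'К',  # U+041A CYRILLIC CAPITAL LETTER KA
--     'M': 'М',  # U+041C CYRILLIC CAPITAL LETTER EM
--     'O': 'О',  # U+041E CYRILLIC CAPITAL LETTER O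
--     'P': 'Р',  # U+0420 CYRILLIC CAPITAL LETTER ER
--     'T': 'Т',  # U+0422 CYRILLIC CAPITAL LETTER TE
--     'X': 'Х',  # U+0425 CYRILLIC CAPITAL LETTER HA
--     'Y': 'У',  # U+0423 CYRILLIC CAPITAL LETTER U
-- }
--
-- def apply_homoglyph_to_word(word: str) -> str:
--     """将单词中的第一个或第二个字母替换为同形字（保持其余不变）"""
--     result = list(word)
--     replaced = 0
--     for i, ch in enumerate(result):
--         if ch in HOMOGLYPHS and replaced < 2:
--             result[i] = HOMOGLYPHS[ch]
--             replaced += 1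
--             if replaced >= 2:
--                 break
--     return ''.join(result)
-- ===== SOURCE B (Python) =====
-- HOMOGLYPHS = {
--     'a': 'а', 'c': 'с', 'e': 'е', 'o': 'о', 'p': 'р', 'x': 'х', 'y': 'у',
--     'A': 'А', 'B': 'В', 'C': 'С', 'E': 'Е', 'H': 'Н', 'K': 'К', 'M': 'М',
--     'O': 'О', 'P': 'Р', 'T': 'Т', 'X': 'Х', 'Y': 'У',
-- }
--
-- def apply_homoglyph_to_word(word: str) -> str:
--     # collect all eligible positions, keep the first two
--     targets = [i for i, ch in enumerate(word) if ch in HOMOGLYPHS][:2]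
--     # replace exactly at those positions
--     return ''.join(HOMOGLYPHS[ch] if i in targets else ch
--                    for i, ch in enumerate(word))
-- ===== Notes on version B (the rewrite author's own statement) =====
-- stated objective: alternative
-- what changed: B first collects the list of homoglyph-eligible indices and slices the first two, then builds the output by replacing only at those indices, instead of A's fused single loop with a replacement counter and break.
import Mathlib
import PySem

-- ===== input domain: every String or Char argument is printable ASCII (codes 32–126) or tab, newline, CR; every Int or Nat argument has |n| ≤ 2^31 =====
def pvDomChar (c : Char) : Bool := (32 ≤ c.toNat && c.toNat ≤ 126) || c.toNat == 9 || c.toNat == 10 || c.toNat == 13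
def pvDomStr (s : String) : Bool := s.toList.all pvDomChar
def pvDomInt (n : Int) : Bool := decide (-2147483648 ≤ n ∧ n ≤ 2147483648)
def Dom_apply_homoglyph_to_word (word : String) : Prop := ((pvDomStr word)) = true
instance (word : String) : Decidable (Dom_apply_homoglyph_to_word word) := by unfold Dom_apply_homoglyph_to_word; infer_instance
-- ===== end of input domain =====

-- B collects the eligible indices first and slices the first two, then replaces only there;
-- A fuses counting and replacing in one loop with a break. Equivalent; objective: alternative decomposition.

def HOMOGLYPHS : PySem.Dict Char Char := PySem.Dict.ofList
  [('a', 'а'), ('c', 'с'), ('e', 'е'), ('o', 'о'), ('p', 'р'), ('x', 'х'), ('y', 'у'),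
   ('A', 'А'), ('B', 'В'), ('C', 'С'), ('E', 'Е'), ('H', 'Н'), ('K', 'К'), ('M', 'М'),
   ('O', 'О'), ('P', 'Р'), ('T', 'Т'), ('X', 'Х'), ('Y', 'У')]

-- ===== PORT A =====
-- the for-loop over `result` with counter `replaced`; break when replaced reaches 2
def pvLoopA : List Char → Nat → List Char
  | [], _ => []
  | c :: rest, replaced =>
    if (HOMOGLYPHS.contains c) = true ∧ replaced < 2 then
      (HOMOGLYPHS.get? c).getD c ::
        (if replaced + 1 ≥ 2 then rest else pvLoopA rest (replaced + 1))
    else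
      c :: pvLoopA rest replaced

def apply_homoglyph_to_word (word : String) : String :=
  String.ofList (pvLoopA word.toList 0)

-- ===== PORT B =====
def apply_homoglyph_to_word_alt (word : String) : String :=
  let targets : List Int :=
    (((PySem.List.enumerate word.toList 0).filter
        (fun p => HOMOGLYPHS.contains p.2)).map Prod.fst).take 2
  String.ofList ((PySem.List.enumerate word.toList 0).map
    (fun p => if p.1 ∈ targets then (HOMOGLYPHS.get? p.2).getD p.2 else p.2))

-- ===== PRECONDITION & SPEC =====
def Spec_apply_homoglyph_to_word (word : String) (out : String) : Prop := out = apply_homoglyph_to_word_alt word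
instance (word : String) (out : String) : Decidable (Spec_apply_homoglyph_to_word word out) := by unfold Spec_apply_homoglyph_to_word; infer_instance

-- ===== CLAIM (what is proved, stated in full; the proofs are below) =====
def Claim_equal_apply_homoglyph_to_word : Prop := ∀ (word : String), Dom_apply_homoglyph_to_word word → Spec_apply_homoglyph_to_word word (apply_homoglyph_to_word word)

-- ===== LEMMAS AND PROOFS =====

-- canonical "replace the first b eligible characters" recursion
def pvMT : List Char → Nat → List Char
  | [], _ => []
  | c :: rest, b =>
    if (HOMOGLYPHS.contains c) = true ∧ 0 < b then
      (HOMOGLYPHS.get? c).getD c :: pvMT rest (b - 1)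
    else
      c :: pvMT rest b

lemma pvMT_zero (l : List Char) : pvMT l 0 = l := by
  induction l with
  | nil => rfl
  | cons c rest ih => simp [pvMT, ih]

lemma pvLoopA_eq_pvMT (l : List Char) : ∀ r : Nat, pvLoopA l r = pvMT l (2 - r) := by
  induction l with
  | nil => intro r; rfl
  | cons c rest ih =>
    intro r
    by_cases hc : (HOMOGLYPHS.contains c) = true
    · by_cases hr : r < 2
      · simp only [pvLoopA, pvMT, hc, hr, Nat.sub_pos_of_lt hr, and_true, if_pos]
        by_cases hr1 : r + 1 ≥ 2
        · have h1 : 2 - r - 1 = 0 := by omega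
          simp [hr1, h1, pvMT_zero]
        · have h2 : 2 - (r + 1) = 2 - r - 1 := by omega
          simp [hr1, ih (r + 1), h2]
      · have hb : ¬ 0 < 2 - r := by omega
        simp [pvLoopA, pvMT, hc, hr, hb, ih r]
    · simp [pvLoopA, pvMT, hc, ih r]

-- index list of eligible positions, starting from offset s
def pvIdxs (l : List Char) (s : Int) : List Int :=
  ((PySem.List.enumerate l s).filter (fun p => HOMOGLYPHS.contains p.2)).map Prod.fst

lemma pvIdxs_mem_lt {l : List Char} {s i : Int} (h : i ∈ pvIdxs l s) : s ≤ i := by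
  unfold pvIdxs at h
  rcases List.mem_map.mp h with ⟨p, hp, rfl⟩
  rcases (PySem.List.mem_enumerate_iff _ _ _).mp (List.mem_filter.mp hp).1 with ⟨k, _, rfl⟩
  simp

lemma pvMapB_eq_pvMT (l : List Char) : ∀ (s : Int) (b : Nat),
    (PySem.List.enumerate l s).map
      (fun p => if p.1 ∈ (pvIdxs l s).take b then (HOMOGLYPHS.get? p.2).getD p.2 else p.2)
      = pvMT l b := by
  induction l with
  | nil => intro s b; rfl
  | cons c rest ih =>
    intro s b
    rw [PySem.List.enumerate_cons]
    by_cases hc : (HOMOGLYPHS.contains c) = true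
    · have hidx : pvIdxs (c :: rest) s = s :: pvIdxs rest (s + 1) := by
        simp [pvIdxs, PySem.List.enumerate_cons, hc]
      cases b with
      | zero =>
        have : ∀ p : Int × Char, p ∈ PySem.List.enumerate rest (s+1) →
            (if p.1 ∈ (pvIdxs (c::rest) s).take 0 then (HOMOGLYPHS.get? p.2).getD p.2 else p.2) = p.2 := by
          intro p _ ; simp
        simp only [List.map_cons, List.take_zero, List.mem_nil_iff]
        calc (s, c).2 :: (PySem.List.enumerate rest (s+1)).map
              (fun p => if p.1 ∈ ([] : List Int) then (HOMOGLYPHS.get? p.2).getD p.2 else p.2)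
            = c :: (PySem.List.enumerate rest (s+1)).map (fun p => p.2) := by simp
          _ = c :: rest := by rw [PySem.List.map_snd_enumerate]
          _ = pvMT (c :: rest) 0 := by rw [pvMT_zero]
      | succ k =>
        rw [hidx]
        simp only [List.take_succ_cons, List.map_cons]
        have hrhs : pvMT (c :: rest) (k + 1) = (HOMOGLYPHS.get? c).getD c :: pvMT rest k := by
          simp [pvMT, hc]
        rw [hrhs]
        congr 1
        · simp
        · rw [← ih (s + 1) k]
          apply List.map_congr_left
          intro p hp
          rcases (PySem.List.mem_enumerate_iff _ _ _).mp hp with ⟨j, _, rfl⟩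
          have hne : (s + 1 + (j : Int)) ≠ s := by omega
          simp [hne]
    · have hidx : pvIdxs (c :: rest) s = pvIdxs rest (s + 1) := by
        simp [pvIdxs, PySem.List.enumerate_cons, hc]
      rw [hidx]
      simp only [List.map_cons]
      have hrhs : pvMT (c :: rest) b = c :: pvMT rest b := by
        simp [pvMT, hc]
      rw [hrhs]
      congr 1
      · have hmem : ¬ (s : Int) ∈ (pvIdxs rest (s + 1)).take b := by
          intro hmem
          have := pvIdxs_mem_lt (List.mem_of_mem_take hmem)
          omega
        simp [hmem]
      · rw [← ih (s + 1) b]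

-- ===== VERDICT (by name: the statement is the Claim_ definition above) =====
theorem apply_homoglyph_to_word_spec : Claim_equal_apply_homoglyph_to_word := by
  intro word _
  unfold Spec_apply_homoglyph_to_word apply_homoglyph_to_word apply_homoglyph_to_word_alt
  rw [pvLoopA_eq_pvMT, ← pvMapB_eq_pvMT word.toList 0 2]
  rfl
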